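-- pv_equiv track=rewrite | github.com/cgreil/BA_Thesis | src/util/Antisymmetry.py | _determine_ordering
-- ===== SOURCE A (Python) =====
-- from typing import Dict, List
--
-- def _determine_ordering(index_dict: Dict[str, int]):
--     """Function which takes a dictionary with
--     <key> ... name of the index
--     <value> ... the value of the index
--     and returns a List[int]
--     where the ith number of the list signifies the
--     order (starting with 1) of the ith index of the dict compared to all other indices.
--
--     As an example, if list[3] = 2, it means that the 4th(zero-indexed) entry of the dict
--     has the second-largest value.
--     """
--     sorted_dict = _sort_dict_by_values(index_dict)
--     # Notice that this index_list [a, b, c, ... ] corresponds to the assignments alpha = a, beta = b, gamma = c, ...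
--     # within the paper
--     ordering = []
--     # since insertion order is preserved, can convert the keyset to list to do get position values:
--     index_list = list(index_dict.keys())
--     # iterate over indexes
--     for elem in index_list:
--         # find index in sorted list, add <position> to ordering
--         position = list(sorted_dict.keys()).index(elem)
--         ordering.append(position)
--
--     return ordering
--
-- def _sort_dict_by_values(dict: Dict[str, int]):
--     # Taken from https://stackoverflow.com/questions/613183/how-do-i-sort-a-dictionary-by-value/613218#613218
--     return {key: value for key, value in sorted(dict.items(), key=lambda item: item[1])}
-- ===== SOURCE B (Python) =====
-- def _determine_ordering(index_dict):
--     vals = list(index_dict.values())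
--     n = len(vals)
--     # argsort: positions of the dict entries in value order (stable, so ties keep insertion order)
--     order = sorted(range(n), key=lambda i: vals[i])
--     # invert the permutation with one scatter pass
--     ordering = [0] * n
--     for rank, i in enumerate(order):
--         ordering[i] = rank
--     return ordering
-- ===== Notes on version B (the rewrite author's own statement) =====
-- stated objective: faster
-- what changed: A builds a value-sorted dict and, for every key, rescans the sorted key list with .index (a quadratic gather); B computes one stable argsort permutation of the indices and inverts it with a single scatter pass (ordering[i]=rank), never searching the keys.
import Mathlib
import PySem

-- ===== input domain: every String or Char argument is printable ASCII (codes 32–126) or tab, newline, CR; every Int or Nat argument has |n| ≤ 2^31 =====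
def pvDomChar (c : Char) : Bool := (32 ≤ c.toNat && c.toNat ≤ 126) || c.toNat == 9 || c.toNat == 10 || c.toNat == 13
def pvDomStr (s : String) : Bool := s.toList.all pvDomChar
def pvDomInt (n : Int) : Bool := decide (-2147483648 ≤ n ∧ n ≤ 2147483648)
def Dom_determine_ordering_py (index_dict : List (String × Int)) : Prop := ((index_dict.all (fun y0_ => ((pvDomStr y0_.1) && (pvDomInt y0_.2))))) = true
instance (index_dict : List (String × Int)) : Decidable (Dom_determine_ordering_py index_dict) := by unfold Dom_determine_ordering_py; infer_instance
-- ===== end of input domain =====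

-- B replaces A's quadratic per-key rescan of the sorted key list by one stable argsort of
-- the indices followed by a single permutation-inverting scatter pass (objective: faster).


-- ===== PORT A =====
-- _sort_dict_by_values: dict comprehension over sorted(dict.items(), key=lambda item: item[1])
def sortDictByValues (d : List (String × Int)) : PySem.Dict String Int :=
  (PySem.List.sorted d (fun item => item.2)).foldl
    (fun acc p => acc.insert p.1 p.2) PySem.Dict.empty

def determine_ordering_py (index_dict : List (String × Int)) : List Int :=
  let sorted_dict := sortDictByValues index_dict
  -- list(index_dict.keys()) (the argument models a dict, so its keys are its first components)
  let index_list := index_dict.map (·.1)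
  index_list.foldl (fun ordering elem =>
    -- list(sorted_dict.keys()).index(elem); ValueError (none) is unreachable: elem is a key
    match PySem.List.index? sorted_dict.keys elem with
    | some position => ordering ++ [(position : Int)]
    | none => ordering) []

-- ===== PORT B =====
def determine_ordering_py_alt (index_dict : List (String × Int)) : List Int :=
  let vals := index_dict.map (·.2)
  -- order = sorted(range(n), key=lambda i: vals[i])  (pyGetD: vals[i] never raises here)
  let order := PySem.List.sorted (PySem.List.pyRange 0 (vals.length : Int) 1)
    (fun i => PySem.List.pyGetD vals i 0)
  -- ordering = [0]*n; for rank, i in enumerate(order): ordering[i] = rank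
  let ordering := List.replicate vals.length (0 : Int)
  (PySem.List.enumerate order).foldl (fun acc p => PySem.List.pySetD acc p.2 p.1) ordering

-- ===== PRECONDITION & SPEC =====
-- The argument stands for a Python dict (which cannot hold the same key twice): Pre_ admits
-- exactly the association lists that represent a dict, i.e. those with pairwise-distinct keys.
def Pre_determine_ordering_py (index_dict : List (String × Int)) : Prop :=
  (index_dict.map (·.1)).Nodup
instance (index_dict : List (String × Int)) : Decidable (Pre_determine_ordering_py index_dict) := by unfold Pre_determine_ordering_py; infer_instance

def pvWitness_determine_ordering_py : (List (String × Int)) := [("a", 2), ("b", 1), ("c", 2)]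

def Spec_determine_ordering_py (index_dict : List (String × Int)) (out : List Int) : Prop := out = determine_ordering_py_alt index_dict
instance (index_dict : List (String × Int)) (out : List Int) : Decidable (Spec_determine_ordering_py index_dict out) := by unfold Spec_determine_ordering_py; infer_instance

-- ===== CLAIM (what is proved, stated in full; the proofs are below) =====
def Claim_equal_determine_ordering_py : Prop := ∀ (index_dict : List (String × Int)), Dom_determine_ordering_py index_dict → Pre_determine_ordering_py index_dict → Spec_determine_ordering_py index_dict (determine_ordering_py index_dict)

-- ===== LEMMAS AND PROOFS =====

-- mapping a key-preserving function through insertBy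
theorem insertBy_map {α β : Type} (f : α → β) (pA : α → α → Bool) (pB : β → β → Bool)
    (hp : ∀ a b, pB (f a) (f b) = pA a b) (x : α) (ys : List α) :
    (PySem.List.insertBy pA x ys).map f = PySem.List.insertBy pB (f x) (ys.map f) := by
  induction ys with
  | nil => simp [PySem.List.insertBy]
  | cons y t ih =>
    simp only [PySem.List.insertBy, List.map_cons, hp]
    by_cases h : pA x y = true
    · simp [h]
    · simp [h, ih]

-- mapping a key-preserving function through the stable sort
theorem sorted_map {α β κ : Type} [LinearOrder κ] (f : α → β)
    (keyA : α → κ) (keyB : β → κ) (hk : ∀ a, keyB (f a) = keyA a) (xs : List α) :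
    (PySem.List.sorted xs keyA).map f = PySem.List.sorted (xs.map f) keyB := by
  rw [PySem.List.sorted_eq_foldl_insertBy, PySem.List.sorted_eq_foldl_insertBy]
  suffices h : ∀ (acc : List α),
      (xs.foldl (fun acc x => PySem.List.insertBy (fun a b => decide (keyA a < keyA b)) x acc) acc).map f
      = (xs.map f).foldl (fun acc x => PySem.List.insertBy (fun a b => decide (keyB a < keyB b)) x acc) (acc.map f) by
    simpa using h []
  induction xs with
  | nil => intro acc; simp
  | cons x t ih =>
    intro acc
    simp only [List.foldl_cons, List.map_cons, ih]
    rw [insertBy_map f (fun a b => decide (keyA a < keyA b)) (fun a b => decide (keyB a < keyB b))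
      (fun a b => by simp only [hk])]

-- index? through an injective-on-the-list map
theorem index?_map_inj {α β : Type} [DecidableEq α] [DecidableEq β] (h : α → β) (v : α)
    (O : List α) (hinj : ∀ x ∈ O, (h x = h v ↔ x = v)) :
    PySem.List.index? (O.map h) (h v) = PySem.List.index? O v := by
  induction O with
  | nil => simp
  | cons x t ih =>
    rw [List.map_cons]
    by_cases hx : x = v
    · subst hx
      rw [PySem.List.index?_cons_self, PySem.List.index?_cons_self]
    · have hhx : h x ≠ h v := by
        intro hc; exact hx ((hinj x (by simp)).mp hc)
      rw [PySem.List.index?_cons_of_ne _ hhx, PySem.List.index?_cons_of_ne _ hx,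
        ih (fun y hy => hinj y (by simp [hy]))]

-- the scatter loop: ordering[i] = rank, read back through index?
theorem scatter_getElem? (L : List Int) (s : Int) (acc : List Int)
    (hL : ∀ x ∈ L, 0 ≤ x ∧ x.toNat < acc.length) (hnd : L.Nodup) (p : Nat) (hp : p < acc.length) :
    ((PySem.List.enumerate L s).foldl (fun a q => PySem.List.pySetD a q.2 q.1) acc)[p]? =
      match PySem.List.index? L (p : Int) with
      | some j => some (s + (j : Int))
      | none => acc[p]? := by
  induction L generalizing s acc with
  | nil => simp [PySem.List.enumerate_nil]
  | cons x t ih =>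
    obtain ⟨hx0, hxlt⟩ := hL x (by simp)
    rw [PySem.List.enumerate_cons, List.foldl_cons]
    have hset : PySem.List.pySetD acc x s = acc.set x.toNat s := PySem.List.pySetD_of_nonneg _ _ hx0
    have hlen : (acc.set x.toNat s).length = acc.length := by simp
    by_cases hxp : x = (p : Int)
    · subst hxp
      rw [PySem.List.index?_cons_self]
      have hnt : (p : Int) ∉ t := (List.nodup_cons.mp hnd).1
      have := ih (s + 1) (acc.set (p : Int).toNat s)
        (fun y hy => by have := hL y (by simp [hy]); simpa [hlen] using this)
        (List.nodup_cons.mp hnd).2 (by simpa [hlen] using hp)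
      rw [hset, this, (PySem.List.index?_eq_none_iff t (p : Int)).mpr hnt]
      simp [hp]
    · rw [PySem.List.index?_cons_of_ne _ hxp]
      have := ih (s + 1) (acc.set x.toNat s)
        (fun y hy => by have := hL y (by simp [hy]); simpa [hlen] using this)
        (List.nodup_cons.mp hnd).2 (by simpa [hlen] using hp)
      rw [hset, this]
      cases hidx : PySem.List.index? t (p : Int) with
      | some j => simp; ring
      | none =>
        simp only [Option.map_none]
        have hne : x.toNat ≠ p := by omega
        simp [List.getElem?_set_ne hne]

theorem scatter_length (L : List (Int × Int)) (acc : List Int) :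
    (L.foldl (fun a q => PySem.List.pySetD a q.2 q.1) acc).length = acc.length := by
  induction L generalizing acc with
  | nil => rfl
  | cons q t ih => simp [ih, PySem.List.length_pySetD]

-- ===== VERDICT (by name: the statement is the Claim_ definition above) =====
-- the heart of the file: A and B agree on every dict-shaped input
theorem determine_ordering_eq (d : List (String × Int)) (hpre : (d.map (·.1)).Nodup) :
    determine_ordering_py d = determine_ordering_py_alt d := by
  have hvlen : (d.map (fun p => p.2)).length = d.length := by simp
  -- the index list and the argsort permutation of port B
  set f : Int → String × Int := fun i => PySem.List.pyGetD d i ("", 0) with hf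
  set keyA : Int → Int := fun i => PySem.List.pyGetD (d.map (fun p => p.2)) i 0 with hkeyA
  set idxs : List Int := PySem.List.pyRange 0 ((d.map (fun p => p.2)).length : Int) 1 with hidxs
  set order : List Int := PySem.List.sorted idxs keyA with horder
  have hmem : ∀ x ∈ order, 0 ≤ x ∧ x < (d.length : Int) := by
    intro x hx
    rw [horder, PySem.List.mem_sorted, hidxs, PySem.List.mem_pyRange_one] at hx
    omega
  have hndorder : order.Nodup :=
    ((PySem.List.sorted_perm idxs keyA false).nodup_iff).mpr (PySem.List.nodup_pyRange_one _ _)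
  have hkey : ∀ i, (f i).2 = keyA i := by
    intro i
    rw [hf, hkeyA]
    simpa using (PySem.List.pyGetD_map (fun p : String × Int => p.2) d i ("", 0)).symm
  have hmapf : idxs.map f = d := by
    rw [hidxs, hf]
    simp only [hvlen]
    exact PySem.List.map_pyGetD_pyRange_zero' d ("", 0)
  have hsorted : PySem.List.sorted d (fun item => item.2) = order.map f := by
    rw [horder, sorted_map f keyA (fun p => p.2) hkey idxs, hmapf]
  -- the keys of A's value-sorted dict
  have hndsk : ((PySem.List.sorted d (fun item => item.2)).map (fun p => p.1)).Nodup :=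
    (((PySem.List.sorted_perm d (fun item => item.2) false).map (fun p => p.1)).nodup_iff).mpr hpre
  have hS : (sortDictByValues d).keys
      = (PySem.List.sorted d (fun item => item.2)).map (fun p => p.1) := by
    unfold sortDictByValues
    rw [PySem.Dict.keys_foldl_insert_key (PySem.List.sorted d (fun item => item.2))
      (fun p => p.1) (fun acc p => p.2) PySem.Dict.empty, PySem.Dict.keys_empty]
    have hupd : PySem.Set.update ([] : List String)
        ((PySem.List.sorted d (fun item => item.2)).map (fun p => p.1))
        = PySem.Set.ofList ((PySem.List.sorted d (fun item => item.2)).map (fun p => p.1)) := by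
      rw [PySem.Set.ofList_eq_foldl]; rfl
    rw [hupd, PySem.Set.ofList_eq_self_of_nodup _ hndsk]
  -- A in map normal form
  have hA : determine_ordering_py d = (d.map (fun p => p.1)).map
      (fun k => (((PySem.List.index? (sortDictByValues d).keys k).getD 0 : Nat) : Int)) := by
    unfold determine_ordering_py
    rw [PySem.List.foldl_congr_mem' _ _
      (fun acc k => acc ++ [(((PySem.List.index? (sortDictByValues d).keys k).getD 0 : Nat) : Int)]) _ ?_]
    · rw [PySem.List.foldl_append_singleton_eq_map, List.nil_append]
    · intro x hx acc
      have hxS : x ∈ (sortDictByValues d).keys := by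
        rw [hS]
        exact ((PySem.List.sorted_perm d (fun item => item.2) false).map (fun p => p.1)).mem_iff.mpr hx
      obtain ⟨j, hj⟩ := Option.isSome_iff_exists.mp
        ((PySem.List.index?_isSome_iff _ _).mpr hxS)
      have hj' := hj
      rw [PySem.List.index?_eq_idxOf?] at hj'
      rw [hj]
      simp [hj']
  -- both sides, element by element
  apply List.ext_getElem?
  intro i
  by_cases hi : i < d.length
  · -- the common value: the rank of position i in the argsort permutation
    have hiorder : (i : Int) ∈ order := by
      rw [horder, PySem.List.mem_sorted, hidxs, PySem.List.mem_pyRange_one]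
      omega
    obtain ⟨j, hj⟩ := Option.isSome_iff_exists.mp
      ((PySem.List.index?_isSome_iff order (i : Int)).mpr hiorder)
    -- A side
    have hfi : ∀ (k : Nat) (hk : k < d.length), f (k : Int) = d[k]'hk := by
      intro k hk
      rw [hf]
      show PySem.List.pyGetD d (k : Int) ("", 0) = d[k]'hk
      rw [PySem.List.pyGetD_eq_getElem d ("", 0) (by omega) (by exact_mod_cast hk)]
      simp
    have hinj : ∀ x ∈ order, ((f x).1 = (f (i : Int)).1 ↔ x = (i : Int)) := by
      intro x hx
      obtain ⟨hx0, hxlt⟩ := hmem x hx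
      constructor
      · intro he
        have hxn : x.toNat < d.length := by omega
        have hxe : f x = d[x.toNat]'hxn := by
          show PySem.List.pyGetD d x ("", 0) = d[x.toNat]'hxn
          rw [PySem.List.pyGetD_eq_getElem d ("", 0) hx0 (by omega)]
        have hie : f (i : Int) = d[i] := hfi i hi
        rw [hxe, hie] at he
        have h1 : (d.map (fun p => p.1))[x.toNat]'(by simpa using (by omega : x.toNat < d.length))
            = (d.map (fun p => p.1))[i]'(by simpa using hi) := by
          simpa using he
        have := (List.Nodup.getElem_inj_iff hpre).mp h1
        omega
      · rintro rfl; rfl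
    have hSmap : (sortDictByValues d).keys = order.map (fun r => (f r).1) := by
      rw [hS, hsorted, List.map_map]
      rfl
    have hidxeq : PySem.List.index? (sortDictByValues d).keys ((f (i : Int)).1)
        = PySem.List.index? order (i : Int) := by
      rw [hSmap]
      exact index?_map_inj (fun r => (f r).1) (i : Int) order hinj
    have hAi : (determine_ordering_py d)[i]? = some ((j : Nat) : Int) := by
      rw [hA]
      rw [List.getElem?_map, List.getElem?_map]
      rw [List.getElem?_eq_getElem (by omega : i < d.length)]
      simp only [Option.map_some]
      congr 1
      have harg : (d[i].1) = (f (i : Int)).1 := by rw [hfi i hi]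
      rw [harg, hidxeq, hj]
      rfl
    -- B side
    have hBi : (determine_ordering_py_alt d)[i]? = some ((j : Nat) : Int) := by
      unfold determine_ordering_py_alt
      simp only [← hkeyA, ← hidxs, ← horder]
      rw [scatter_getElem? order 0 (List.replicate (d.map (fun p => p.2)).length 0)
        (by intro x hx; have := hmem x hx; simp only [List.length_replicate, hvlen]; omega)
        hndorder i (by simp only [List.length_replicate, hvlen]; omega)]
      rw [hj]
      norm_num
    rw [hAi, hBi]
  · -- out of range on both sides
    have hlenA : (determine_ordering_py d).length = d.length := by
      rw [hA]; simp
    have hlenB : (determine_ordering_py_alt d).length = d.length := by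
      unfold determine_ordering_py_alt
      rw [scatter_length]
      simp
    rw [List.getElem?_eq_none (by omega), List.getElem?_eq_none (by omega)]

-- ===== VERDICT (by name: the statement is the Claim_ definition above) =====
theorem determine_ordering_py_spec : Claim_equal_determine_ordering_py := by
  intro d _hdom hpre
  exact determine_ordering_eq d hpre
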